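-- pv_equiv track=rewrite | github.com/every-algorithm/python | bioinformatics/sequence_clustering.py | update_medoids
-- ===== SOURCE A (Python) =====
-- def edit_distance(s1, s2):
--     """Compute the Levenshtein distance between two strings."""
--     m, n = len(s1), len(s2)
--     dp = [[0] * (n + 1) for _ in range(m + 1)]
--     for i in range(m + 1):
--         dp[i][0] = i
--     for j in range(n + 1):
--         dp[0][j] = j
--     for i in range(1, m + 1):
--         for j in range(1, n + 1):
--             cost = 0 if s1[i - 1] == s2[j - 1] else 1
--             dp[i][j] = min(dp[i - 1][j] + 1,      # deletion
--                            dp[i][j - 1] + 1,      # insertion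
--                            dp[i - 1][j - 1] + cost)  # substitution
--     return dp[m][n]
--
-- def update_medoids(clusters):
--     """Update medoids to the sequence with minimal total distance within each cluster."""
--     new_medoids = []
--     for cluster_seqs in clusters.values():
--         if not cluster_seqs:
--             continue
--         best = None
--         best_dist = float('inf')
--         for candidate in cluster_seqs:
--             total = sum(edit_distance(candidate, s) for s in cluster_seqs)
--             if total < best_dist:
--                 best_dist = total
--                 best = candidate
--         new_medoids.append(best)
--     return new_medoids
-- ===== SOURCE B (Python) =====
-- def edit_distance(s1, s2):
--     """Levenshtein distance via a rolling single-row DP (O(len(s2)) space)."""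
--     n = len(s2)
--     prev = list(range(n + 1))
--     for i, c1 in enumerate(s1, 1):
--         curr = [i]
--         for j, c2 in enumerate(s2, 1):
--             cost = 0 if c1 == c2 else 1
--             curr.append(min(prev[j] + 1, curr[j - 1] + 1, prev[j - 1] + cost))
--         prev = curr
--     return prev[n]
--
-- def update_medoids(clusters):
--     """Update medoids to the sequence with minimal total distance within each cluster."""
--     new_medoids = []
--     for seqs in clusters.values():
--         if not seqs:
--             continue
--         k = len(seqs)
--         # accumulate pair sums: each unordered pair's distance is computed ONCE
--         # (edit distance is symmetric, and the self-distance is 0)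
--         totals = [0] * k
--         for i in range(k):
--             for j in range(i + 1, k):
--                 d = edit_distance(seqs[i], seqs[j])
--                 totals[i] += d
--                 totals[j] += d
--         best = 0
--         for i in range(1, k):
--             if totals[i] < totals[best]:
--                 best = i
--         new_medoids.append(seqs[best])
--     return new_medoids
-- ===== Notes on version B (the rewrite author's own statement) =====
-- stated objective: faster
-- what changed: B computes each unordered pair's edit distance ONCE and accumulates it into both candidates' running totals (exploiting symmetry and the zero self-distance), then picks the first strict argmin by index, instead of A's recomputing every candidate-vs-all sum (k^2 distance calls vs k(k-1)/2); B's edit_distance also uses a rolling single row instead of A's full matrix.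
import Mathlib
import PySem

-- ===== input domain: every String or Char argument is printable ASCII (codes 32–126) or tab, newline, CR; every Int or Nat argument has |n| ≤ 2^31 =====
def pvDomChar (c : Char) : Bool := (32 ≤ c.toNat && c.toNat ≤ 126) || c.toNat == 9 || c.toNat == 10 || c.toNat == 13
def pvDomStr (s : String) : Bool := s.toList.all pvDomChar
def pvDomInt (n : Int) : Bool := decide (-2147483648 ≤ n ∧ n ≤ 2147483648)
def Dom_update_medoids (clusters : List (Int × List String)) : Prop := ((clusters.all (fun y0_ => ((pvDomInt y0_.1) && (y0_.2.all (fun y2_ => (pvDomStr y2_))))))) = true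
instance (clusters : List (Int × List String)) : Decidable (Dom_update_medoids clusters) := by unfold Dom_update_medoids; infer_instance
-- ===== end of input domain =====

-- B computes each pairwise edit distance ONCE (the distance is symmetric, the self-distance 0),
-- accumulating it into both candidates' totals, and then picks the first strict argmin by index;
-- its edit_distance uses a rolling single row instead of A's full matrix (objective: faster, constant factor).

-- ===== PORT A =====
def pvEditDistance (s1 s2 : String) : Int :=
  let cs1 := s1.toList
  let cs2 := s2.toList
  let m := cs1.length
  let n := cs2.length
  let dp0 : List (List Int) := (List.range (m+1)).map (fun _ => List.replicate (n+1) (0:Int))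
  let dp1 := (List.range (m+1)).foldl (fun dp i => dp.set i ((dp.getD i []).set 0 (i : Int))) dp0
  let dp2 := (List.range (n+1)).foldl (fun dp j => dp.set 0 ((dp.getD 0 []).set j (j : Int))) dp1
  let dp3 := (List.range' 1 m).foldl (fun dp i =>
      (List.range' 1 n).foldl (fun dp j =>
        dp.set i ((dp.getD i []).set j
          (min ((dp.getD (i-1) []).getD j 0 + 1)
            (min ((dp.getD i []).getD (j-1) 0 + 1)
                 ((dp.getD (i-1) []).getD (j-1) 0 +
                   (if cs1.getD (i-1) ' ' = cs2.getD (j-1) ' ' then 0 else 1)))))) dp) dp2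
  (dp3.getD m []).getD n 0

def update_medoids (clusters : List (Int × List String)) : List String :=
  clusters.foldl (fun new_medoids kv =>
    let cluster_seqs := kv.2
    if cluster_seqs = [] then new_medoids
    else
      let st := cluster_seqs.foldl (fun (st : Option String × Option Int) candidate =>
          let total := (cluster_seqs.map (fun s => pvEditDistance candidate s)).sum
          match st.2 with
          | none => (some candidate, some total)
          | some bd => if total < bd then (some candidate, some total) else st)
        ((none, none) : Option String × Option Int)
      new_medoids ++ [st.1.getD ""]) []

-- ===== PORT B =====
def pvEditDistanceAlt (s1 s2 : String) : Int :=
  let cs2 := s2.toList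
  let n := cs2.length
  let prev0 : List Int := (List.range (n+1)).map (fun (j : Nat) => (j:Int))
  let prev := s1.toList.zipIdx.foldl (fun prev ci =>
      cs2.zipIdx.foldl (fun curr cj =>
          curr ++ [min (prev.getD (cj.2+1) 0 + 1)
                   (min (curr.getD cj.2 0 + 1)
                        (prev.getD cj.2 0 + (if ci.1 = cj.1 then 0 else 1)))])
        [((ci.2 : Int) + 1)]) prev0
  prev.getD n 0

-- loop indices i, j are Nats of Python's range(k) / range(i+1, k); all list accesses are in range
def update_medoids_alt (clusters : List (Int × List String)) : List String :=
  clusters.foldl (fun medoids kv =>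
    let seqs := kv.2
    if seqs = [] then medoids
    else
      let k := seqs.length
      let totals := (List.range k).foldl (fun t i =>
          (List.range' (i+1) (k-(i+1))).foldl (fun t j =>
            let d := pvEditDistanceAlt (seqs.getD i "") (seqs.getD j "")
            let t1 := t.set i (t.getD i 0 + d)
            t1.set j (t1.getD j 0 + d)) t) (List.replicate k (0:Int))
      let best := (List.range' 1 (k-1)).foldl (fun best i =>
          if totals.getD i 0 < totals.getD best 0 then i else best) 0
      medoids ++ [seqs.getD best ""]) []

-- ===== PRECONDITION & SPEC =====
def Spec_update_medoids (clusters : List (Int × List String)) (out : List String) : Prop := out = update_medoids_alt clusters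
instance (clusters : List (Int × List String)) (out : List String) : Decidable (Spec_update_medoids clusters out) := by unfold Spec_update_medoids; infer_instance

-- ===== CLAIM (what is proved, stated in full; the proofs are below) =====
def Claim_equal_update_medoids : Prop := ∀ (clusters : List (Int × List String)), Dom_update_medoids clusters → Spec_update_medoids clusters (update_medoids clusters)

-- ===== LEMMAS AND PROOFS =====

-- ---- generic getD/set helpers ----
theorem pv_getD_set_self {α : Type} (l : List α) (i : Nat) (v d : α) (h : i < l.length) :
    (l.set i v).getD i d = v := by
  rw [List.getD_eq_getElem _ d (by simpa using h)]; simp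

theorem pv_getD_set_ne {α : Type} (l : List α) (i j : Nat) (v d : α) (h : i ≠ j) :
    (l.set i v).getD j d = l.getD j d := by
  simp [List.getD, List.getElem?_set_ne h]

theorem pv_getD_take {α : Type} (r : List α) (j i : Nat) (h : i < j) (d : α) :
    (r.take j).getD i d = r.getD i d := by
  simp [List.getD, h]

theorem pv_set_append_len {α : Type} (pre : List α) (x : α) (rest : List α) (v : α) :
    (pre ++ x :: rest).set pre.length v = pre ++ v :: rest := by simp

theorem pv_getD_map_range (N j : Nat) (f : Nat → Int) (h : j < N) :
    ((List.range N).map f).getD j 0 = f j := by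
  rw [List.getD_eq_getElem _ _ (by simpa using h)]; simp

-- ---- A's matrix equals B's rolling row ----
theorem pv_fill_append (F : List Int → Nat → Int)
    (hF : ∀ r r' j, 0 < j → r.take j = r'.take j → F r j = F r' j) :
    ∀ (todo done : List Int), 0 < done.length →
    (List.range' done.length todo.length).foldl (fun row j => row.set j (F row j)) (done ++ todo)
    = (List.range' done.length todo.length).foldl (fun curr j => curr ++ [F curr j]) done := by
  intro todo
  induction todo with
  | nil => intro done _; simp
  | cons x rest ih =>
    intro done hd
    rw [List.length_cons, List.range'_succ, List.foldl_cons, List.foldl_cons]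
    have hv : F (done ++ x :: rest) done.length = F done done.length := by
      apply hF _ _ _ hd; simp
    rw [hv, pv_set_append_len]
    have h2 : (done ++ F done done.length :: rest) = (done ++ [F done done.length]) ++ rest := by simp
    have h3 : done.length + 1 = (done ++ [F done done.length]).length := by simp
    rw [h2, h3, ih _ (by simp)]

theorem pv_inner_abs (i : Nat) (hi1 : 1 ≤ i) (V : List Int → List Int → Nat → Int) :
    ∀ (js : List Nat) (dp : List (List Int)), i < dp.length →
    js.foldl (fun dp j => dp.set i ((dp.getD i []).set j (V (dp.getD (i-1) []) (dp.getD i []) j))) dp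
    = dp.set i (js.foldl (fun row j => row.set j (V (dp.getD (i-1) []) row j)) (dp.getD i [])) := by
  intro js
  induction js with
  | nil =>
    intro dp hlen
    simp only [List.foldl_nil]
    rw [List.getD_eq_getElem _ _ (by simpa using hlen)]
    exact (List.set_getElem_self ..).symm
  | cons j t ih =>
    intro dp hlen
    simp only [List.foldl_cons]
    rw [ih _ (by simpa using hlen)]
    rw [pv_getD_set_ne _ i (i-1) _ _ (by omega), pv_getD_set_self _ _ _ _ hlen, List.set_set]

theorem pv_zip_range (P : List Int) (c1 : Char) (cs2 : List Char) :
    ∀ (l : List Char) (k : Nat), cs2.drop k = l → ∀ (curr : List Int),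
    (l.zipIdx k).foldl (fun curr cj =>
        curr ++ [min (P.getD (cj.2+1) 0 + 1)
                 (min (curr.getD cj.2 0 + 1)
                      (P.getD cj.2 0 + (if c1 = cj.1 then 0 else 1)))]) curr
    = (List.range' (k+1) l.length).foldl (fun curr j =>
        curr ++ [min (P.getD j 0 + 1)
                 (min (curr.getD (j-1) 0 + 1)
                      (P.getD (j-1) 0 + (if c1 = cs2.getD (j-1) ' ' then 0 else 1)))]) curr := by
  intro l
  induction l with
  | nil => intro k h curr; simp
  | cons c t ih =>
    intro k h curr
    have hc : cs2[k]? = some c := by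
      have h0 : (cs2.drop k)[0]? = some c := by rw [h]; rfl
      simpa using h0
    rw [List.zipIdx_cons, List.length_cons, List.range'_succ, List.foldl_cons, List.foldl_cons]
    have ht : cs2.drop (k+1) = t := by
      have := congrArg List.tail h
      simpa [List.tail_drop] using this
    have := ih (k+1) ht
    simp only [Nat.add_sub_cancel] at *
    rw [this]
    simp [hc]

theorem pv_outer (cs1 cs2 : List Char) :
    ∀ (l : List Char) (k : Nat) (dp : List (List Int)) (prev : List Int),
    cs1.drop k = l → k + l.length = cs1.length →
    dp.length = cs1.length + 1 →
    dp.getD k [] = prev →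
    (∀ r, k < r → r ≤ cs1.length → dp.getD r [] = (r:Int) :: List.replicate cs2.length 0) →
    ((List.range' (k+1) l.length).foldl (fun dp i =>
        (List.range' 1 cs2.length).foldl (fun dp j =>
          dp.set i ((dp.getD i []).set j
            (min ((dp.getD (i-1) []).getD j 0 + 1)
              (min ((dp.getD i []).getD (j-1) 0 + 1)
                   ((dp.getD (i-1) []).getD (j-1) 0 +
                     (if cs1.getD (i-1) ' ' = cs2.getD (j-1) ' ' then 0 else 1)))))) dp) dp).getD cs1.length []
    = (l.zipIdx k).foldl (fun prev ci =>
        cs2.zipIdx.foldl (fun curr cj =>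
            curr ++ [min (prev.getD (cj.2+1) 0 + 1)
                     (min (curr.getD cj.2 0 + 1)
                          (prev.getD cj.2 0 + (if ci.1 = cj.1 then 0 else 1)))])
          [((ci.2 : Int) + 1)]) prev := by
  intro l
  induction l with
  | nil =>
    intro k dp prev hdrop hlen hdplen hk _
    have : k = cs1.length := by simpa using hlen
    subst this
    simpa using hk
  | cons c t ih =>
    intro k dp prev hdrop hlen hdplen hk hrows
    have hkm : k + 1 ≤ cs1.length := by simp at hlen; omega
    have hc1 : cs1[k]? = some c := by
      have h0 : (cs1.drop k)[0]? = some c := by rw [hdrop]; rfl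
      simpa using h0
    have ht : cs1.drop (k+1) = t := by
      have := congrArg List.tail hdrop
      simpa [List.tail_drop] using this
    rw [List.zipIdx_cons, List.length_cons, List.range'_succ, List.foldl_cons, List.foldl_cons]
    rw [pv_inner_abs (k+1) (by omega)
        (fun P row j =>
          min (P.getD j 0 + 1)
            (min (row.getD (j-1) 0 + 1)
                 (P.getD (j-1) 0 + (if cs1.getD ((k+1)-1) ' ' = cs2.getD (j-1) ' ' then 0 else 1))))
        (List.range' 1 cs2.length) dp (by omega)]
    simp only [Nat.add_sub_cancel]
    rw [hk, hrows (k+1) (by omega) hkm]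
    have hrow : ((k+1 : Nat) : Int) :: List.replicate cs2.length (0:Int)
        = [((k+1 : Nat) : Int)] ++ List.replicate cs2.length (0:Int) := by simp
    rw [hrow]
    have hfill := pv_fill_append
      (fun row j =>
        min (prev.getD j 0 + 1)
          (min (row.getD (j-1) 0 + 1)
               (prev.getD (j-1) 0 + (if cs1.getD k ' ' = cs2.getD (j-1) ' ' then 0 else 1))))
      (by
        intro r r' j hj htake
        have : r.getD (j-1) 0 = r'.getD (j-1) 0 := by
          rw [← pv_getD_take r j (j-1) (by omega), ← pv_getD_take r' j (j-1) (by omega), htake]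
        show min _ (min (r.getD (j-1) 0 + 1) _) = min _ (min (r'.getD (j-1) 0 + 1) _)
        rw [this])
      (List.replicate cs2.length (0:Int)) [((k+1 : Nat) : Int)] (by simp)
    simp only [List.length_singleton, List.length_replicate] at hfill
    rw [hfill]
    rw [← pv_zip_range prev (cs1.getD k ' ') cs2 cs2 0 rfl]
    have hc1' : cs1.getD k ' ' = c := by simp [List.getD, hc1]
    have hcast : ((k+1 : Nat) : Int) = (k : Int) + 1 := by push_cast; ring
    rw [hc1', hcast]
    exact ih (k+1) _ _ ht (by simp at hlen ⊢; omega) (by simpa using hdplen)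
      (pv_getD_set_self _ _ _ _ (by omega))
      (by
        intro r hr1 hr2
        rw [pv_getD_set_ne _ _ _ _ _ (by omega)]
        exact hrows r (by omega) hr2)

theorem pv_set_fold {α : Type} (g : Nat → α → α) (d : α) :
    ∀ (post pre : List α),
    (List.range' pre.length post.length).foldl (fun dp i => dp.set i (g i (dp.getD i d))) (pre ++ post)
    = pre ++ (post.zipIdx pre.length).map (fun p => g p.2 p.1) := by
  intro post
  induction post with
  | nil => intro pre; simp
  | cons x rest ih =>
    intro pre
    rw [List.length_cons, List.range'_succ, List.foldl_cons]
    have h1 : (pre ++ x :: rest).getD pre.length d = x := by simp [List.getD]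
    rw [h1]
    have h2' : (pre ++ x :: rest).set pre.length (g pre.length x) = pre ++ g pre.length x :: rest := by simp
    rw [h2']
    have h2 : (pre ++ g pre.length x :: rest) = (pre ++ [g pre.length x]) ++ rest := by simp
    have h3 : pre.length + 1 = (pre ++ [g pre.length x]).length := by simp
    rw [h2, h3, ih]
    simp [List.zipIdx_cons]

theorem pv_head_fold (g : Nat → Int) :
    ∀ (js : List Nat) (r : List Int) (rest : List (List Int)),
    js.foldl (fun dp j => dp.set 0 ((dp.getD 0 []).set j (g j))) (r :: rest)
    = (js.foldl (fun row j => row.set j (g j)) r) :: rest := by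
  intro js
  induction js with
  | nil => intro r rest; rfl
  | cons j t ih => intro r rest; simp only [List.foldl_cons]; exact ih _ _

theorem pv_zipmap_replicate {α β : Type} (x : α) (g : Nat → α → β) :
    ∀ (N k : Nat),
    ((List.replicate N x).zipIdx k).map (fun p => g p.2 p.1) = (List.range' k N).map (fun i => g i x) := by
  intro N
  induction N with
  | zero => intro k; simp
  | succ N ih =>
    intro k
    rw [List.replicate_succ, List.zipIdx_cons, List.range'_succ, List.map_cons, List.map_cons, ih]

theorem pv_zipmap_snd {α : Type} (g : Nat → Int) :
    ∀ (l : List α) (k : Nat),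
    (l.zipIdx k).map (fun p => g p.2) = (List.range' k l.length).map g := by
  intro l
  induction l with
  | nil => intro k; simp
  | cons a t ih => intro k; rw [List.zipIdx_cons, List.length_cons, List.range'_succ, List.map_cons, List.map_cons, ih]

theorem pv_init_closed (m n : Nat) :
    (List.range (n+1)).foldl (fun dp j => dp.set 0 ((dp.getD 0 []).set j (j : Int)))
      ((List.range (m+1)).foldl (fun dp i => dp.set i ((dp.getD i []).set 0 (i : Int)))
        ((List.range (m+1)).map (fun _ => List.replicate (n+1) (0:Int))))
    = ((List.range (n+1)).map (fun (j : Nat) => (j:Int)))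
      :: (List.range' 1 m).map (fun (i : Nat) => (i:Int) :: List.replicate n (0:Int)) := by
  have hrep : (List.range (m+1)).map (fun _ => List.replicate (n+1) (0:Int))
      = List.replicate (m+1) (List.replicate (n+1) (0:Int)) := by
    simp [List.map_const']
  rw [hrep]
  have h1 := pv_set_fold (fun i (x : List Int) => x.set 0 (i:Int)) ([] : List Int)
      (List.replicate (m+1) (List.replicate (n+1) (0:Int))) []
  simp only [List.length_nil, List.nil_append, List.length_replicate] at h1
  rw [List.range_eq_range', h1]
  have h1b := pv_zipmap_replicate (List.replicate (n+1) (0:Int)) (fun i (x : List Int) => x.set 0 (i:Int)) (m+1) 0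
  beta_reduce at h1b
  rw [h1b]
  have h2 : List.range' 0 (m+1) = 0 :: List.range' 1 m := by rw [List.range'_succ]
  rw [h2, List.map_cons]
  have h3 : (List.replicate (n+1) (0:Int)).set 0 ((0:Nat):Int) = List.replicate (n+1) (0:Int) := by
    rw [List.replicate_succ]; simp
  rw [h3, pv_head_fold]
  have h4 := pv_set_fold (fun j (_ : Int) => (j:Int)) (0 : Int)
      (List.replicate (n+1) (0:Int)) []
  simp only [List.length_nil, List.nil_append, List.length_replicate] at h4
  have h4b := pv_zipmap_snd (fun j => (j:Int)) (List.replicate (n+1) (0:Int)) 0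
  beta_reduce at h4b
  simp only [List.length_replicate] at h4b
  rw [List.range_eq_range', h4, h4b, ← List.range_eq_range']
  exact congrArg _ (List.map_congr_left (fun i _ => by rw [List.replicate_succ]; simp))

theorem pv_edit_eq (s1 s2 : String) : pvEditDistance s1 s2 = pvEditDistanceAlt s1 s2 := by
  unfold pvEditDistance pvEditDistanceAlt
  simp only []
  rw [pv_init_closed s1.toList.length s2.toList.length]
  have hout := pv_outer s1.toList s2.toList s1.toList 0
      (((List.range (s2.toList.length+1)).map (fun (j : Nat) => (j:Int)))
        :: (List.range' 1 s1.toList.length).map (fun (i : Nat) => (i:Int) :: List.replicate s2.toList.length (0:Int)))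
      ((List.range (s2.toList.length+1)).map (fun (j : Nat) => (j:Int)))
      (by simp) (by simp) (by simp) (by simp [List.getD])
      (by
        intro r hr1 hr2
        match r, hr1 with
        | (rr+1), _ =>
          rw [List.getD_cons_succ]
          have hlt : rr < (List.range' 1 s1.toList.length).length := by
            simp only [List.length_range']; omega
          rw [List.getD_eq_getElem _ _ (by simpa using hlt)]
          simp [List.getElem_range']
          omega)
  simp only [Nat.zero_add] at hout
  rw [hout]

-- ---- a reference Levenshtein (head recursion): symmetry and zero self-distance ----
def pvLev : List Char → List Char → Int
  | [], t => (t.length : Int)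
  | _ :: s, [] => (s.length : Int) + 1
  | a :: s, b :: t =>
      min (pvLev s (b :: t) + 1)
        (min (pvLev (a :: s) t + 1) (pvLev s t + (if a = b then 0 else 1)))
termination_by s t => (s.length, t.length)

theorem pvLev_nil_right (s : List Char) : pvLev s [] = (s.length : Int) := by
  cases s <;> simp [pvLev]

theorem pvLev_nonneg : ∀ (s t : List Char), 0 ≤ pvLev s t := by
  intro s t
  induction s, t using pvLev.induct with
  | case1 t => simp [pvLev]
  | case2 a s => simp [pvLev]; omega
  | case3 a s b t ih1 ih2 ih3 =>
    simp only [pvLev]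
    split_ifs <;> omega

theorem pvLev_symm : ∀ (s t : List Char), pvLev s t = pvLev t s := by
  intro s t
  induction s, t using pvLev.induct with
  | case1 t => rw [pvLev_nil_right]; simp [pvLev]
  | case2 a s => rw [pvLev_nil_right]; simp [pvLev]
  | case3 a s b t ih1 ih2 ih3 =>
    rw [show pvLev (a :: s) (b :: t)
        = min (pvLev s (b :: t) + 1)
            (min (pvLev (a :: s) t + 1) (pvLev s t + (if a = b then 0 else 1))) from by rw [pvLev],
       show pvLev (b :: t) (a :: s)
        = min (pvLev t (a :: s) + 1)
            (min (pvLev (b :: t) s + 1) (pvLev t s + (if b = a then 0 else 1))) from by rw [pvLev]]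
    rw [ih1, ih2, ih3]
    have hcost : (if a = b then (0:Int) else 1) = (if b = a then (0:Int) else 1) := by
      by_cases h : a = b <;> simp [h, Ne.symm]
    rw [hcost]
    omega

theorem pvLev_self : ∀ (s : List Char), pvLev s s = 0 := by
  intro s
  induction s with
  | nil => simp [pvLev]
  | cons a s ih =>
    have h1 := pvLev_nonneg s (a :: s)
    have h2 := pvLev_nonneg (a :: s) s
    simp [pvLev, ih]
    omega

-- pvLevP x y: distance between x and y, via the head-recursive pvLev on the reversed lists
def pvLevP (x y : List Char) : Int := pvLev x.reverse y.reverse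

theorem pvLevP_nil_left (y : List Char) : pvLevP [] y = (y.length : Int) := by
  simp [pvLevP, pvLev]

theorem pvLevP_nil_right (x : List Char) : pvLevP x [] = (x.length : Int) := by
  simp [pvLevP, pvLev_nil_right]

theorem pvLevP_snoc (xs ys : List Char) (a b : Char) :
    pvLevP (xs ++ [a]) (ys ++ [b])
    = min (pvLevP xs (ys ++ [b]) + 1)
        (min (pvLevP (xs ++ [a]) ys + 1) (pvLevP xs ys + (if a = b then 0 else 1))) := by
  unfold pvLevP
  rw [List.reverse_append, List.reverse_append]
  simp only [List.reverse_singleton, List.singleton_append]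
  rw [pvLev]

-- ---- B's rolling row computes pvLevP ----
theorem pv_row (cs2 : List Char) (Xp : List Char) (c1 : Char)
    (prevRow : List Int)
    (hprev : prevRow = (List.range (cs2.length+1)).map (fun j => pvLevP Xp (cs2.take j))) :
    ∀ (l2 : List Char) (j : Nat), cs2.drop j = l2 → j ≤ cs2.length →
    ∀ (curr : List Int),
    curr = (List.range (j+1)).map (fun j' => pvLevP (Xp ++ [c1]) (cs2.take j')) →
    (l2.zipIdx j).foldl (fun curr cj =>
        curr ++ [min (prevRow.getD (cj.2+1) 0 + 1)
                 (min (curr.getD cj.2 0 + 1)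
                      (prevRow.getD cj.2 0 + (if c1 = cj.1 then 0 else 1)))]) curr
    = (List.range (cs2.length+1)).map (fun j' => pvLevP (Xp ++ [c1]) (cs2.take j')) := by
  intro l2
  induction l2 with
  | nil =>
    intro j hdrop hle curr hcurr
    have hj : j = cs2.length := by
      have := congrArg List.length hdrop
      simp at this
      omega
    subst hj
    simpa using hcurr
  | cons c l2' ih =>
    intro j hdrop hle curr hcurr
    have hjlt : j < cs2.length := by
      have := congrArg List.length hdrop
      simp at this
      omega
    have hc : cs2[j]? = some c := by
      have h0 : (cs2.drop j)[0]? = some c := by rw [hdrop]; rfl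
      simpa using h0
    have htake : cs2.take (j+1) = cs2.take j ++ [c] := by
      rw [List.take_add_one, hc]; rfl
    rw [List.zipIdx_cons, List.foldl_cons]
    have hdrop' : cs2.drop (j+1) = l2' := by
      have := congrArg List.tail hdrop
      simpa [List.tail_drop] using this
    apply ih (j+1) hdrop' (by omega)
    rw [hcurr, hprev]
    rw [pv_getD_map_range _ _ _ (by omega), pv_getD_map_range _ _ _ (by omega),
        pv_getD_map_range _ _ _ (by omega)]
    rw [List.range_succ (n := j+1), List.map_append]
    congr 1
    simp only [List.map_cons, List.map_nil]
    rw [htake, pvLevP_snoc]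

theorem pv_outer2 (cs1 cs2 : List Char) :
    ∀ (l1 : List Char) (i : Nat), cs1.drop i = l1 → i ≤ cs1.length →
    ∀ (prev : List Int),
    prev = (List.range (cs2.length+1)).map (fun j => pvLevP (cs1.take i) (cs2.take j)) →
    (l1.zipIdx i).foldl (fun prev ci =>
        cs2.zipIdx.foldl (fun curr cj =>
            curr ++ [min (prev.getD (cj.2+1) 0 + 1)
                     (min (curr.getD cj.2 0 + 1)
                          (prev.getD cj.2 0 + (if ci.1 = cj.1 then 0 else 1)))])
          [((ci.2 : Int) + 1)]) prev
    = (List.range (cs2.length+1)).map (fun j => pvLevP cs1 (cs2.take j)) := by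
  intro l1
  induction l1 with
  | nil =>
    intro i hdrop hle prev hprev
    have hi : i = cs1.length := by
      have := congrArg List.length hdrop
      simp at this
      omega
    subst hi
    simpa [List.take_of_length_le (le_refl _)] using hprev
  | cons c1 l1' ih =>
    intro i hdrop hle prev hprev
    have hilt : i < cs1.length := by
      have := congrArg List.length hdrop
      simp at this
      omega
    have hc : cs1[i]? = some c1 := by
      have h0 : (cs1.drop i)[0]? = some c1 := by rw [hdrop]; rfl
      simpa using h0
    have htake : cs1.take (i+1) = cs1.take i ++ [c1] := by
      rw [List.take_add_one, hc]; rfl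
    rw [List.zipIdx_cons, List.foldl_cons]
    have hdrop' : cs1.drop (i+1) = l1' := by
      have := congrArg List.tail hdrop
      simpa [List.tail_drop] using this
    have hrow := pv_row cs2 (cs1.take i) c1 prev hprev cs2 0 rfl (by omega)
        [((i:Int) + 1)]
        (by
          have hm : (List.range (0+1)).map
              (fun j' => pvLevP (cs1.take i ++ [c1]) (cs2.take j'))
              = [pvLevP (cs1.take i ++ [c1]) []] := by simp
          have hlen : (cs1.take (i+1)).length = i+1 := by
            rw [List.length_take]; omega
          rw [hm, ← htake, pvLevP_nil_right, hlen]
          simp)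
    rw [hrow, ← htake]
    exact ih (i+1) hdrop' (by omega) _ rfl

theorem pv_alt_eq_lev (s1 s2 : String) :
    pvEditDistanceAlt s1 s2 = pvLevP s1.toList s2.toList := by
  have hprev0 : (List.range (s2.toList.length+1)).map (fun (j : Nat) => (j:Int))
      = (List.range (s2.toList.length+1)).map
          (fun j => pvLevP (s1.toList.take 0) (s2.toList.take j)) := by
    apply List.map_congr_left
    intro j hj
    have hj' := List.mem_range.mp hj
    rw [List.take_zero, pvLevP_nil_left, List.length_take]
    congr 1
    omega
  unfold pvEditDistanceAlt
  simp only []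
  rw [pv_outer2 s1.toList s2.toList s1.toList 0 rfl (by omega) _ hprev0]
  rw [pv_getD_map_range _ _ _ (by omega)]
  rw [List.take_length]

theorem pv_alt_symm (s t : String) : pvEditDistanceAlt s t = pvEditDistanceAlt t s := by
  rw [pv_alt_eq_lev, pv_alt_eq_lev]
  exact pvLev_symm _ _

theorem pv_alt_self (s : String) : pvEditDistanceAlt s s = 0 := by
  rw [pv_alt_eq_lev]
  exact pvLev_self _

-- ---- B's pair accumulation computes A's per-candidate totals ----
theorem pv_foldl_ext {α β : Type} (f g : β → α → β) (h : ∀ b a, f b a = g b a) :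
    ∀ (l : List α) (b : β), l.foldl f b = l.foldl g b := by
  intro l
  induction l with
  | nil => intro b; rfl
  | cons a t ih => intro b; rw [List.foldl_cons, List.foldl_cons, h, ih]

theorem pv_foldl_flatMap {α β γ : Type} (g : α → List γ) (f : β → γ → β) :
    ∀ (l : List α) (b : β), (l.flatMap g).foldl f b = l.foldl (fun b a => (g a).foldl f b) b := by
  intro l
  induction l with
  | nil => intro b; rfl
  | cons a t ih => intro b; rw [List.flatMap_cons, List.foldl_append, List.foldl_cons, ih]

theorem pv_acc (d : Nat → Nat → Int) :
    ∀ (PS : List (Nat × Nat)) (t : List Int),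
    (∀ pr ∈ PS, pr.1 < t.length ∧ pr.2 < t.length ∧ pr.1 ≠ pr.2) →
    ∀ (p : Nat),
    (PS.foldl (fun t pr =>
        let t1 := t.set pr.1 (t.getD pr.1 0 + d pr.1 pr.2)
        t1.set pr.2 (t1.getD pr.2 0 + d pr.1 pr.2)) t).getD p 0
    = t.getD p 0
      + (PS.map (fun pr => (if pr.1 = p then d pr.1 pr.2 else 0)
                          + (if pr.2 = p then d pr.1 pr.2 else 0))).sum := by
  intro PS
  induction PS with
  | nil => intro t _ p; simp
  | cons pr rest ih =>
    intro t hmem p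
    obtain ⟨hi, hj, hij⟩ := hmem pr List.mem_cons_self
    rw [List.foldl_cons, List.map_cons, List.sum_cons]
    have hstep : ∀ q : Nat,
        ((t.set pr.1 (t.getD pr.1 0 + d pr.1 pr.2)).set pr.2
          ((t.set pr.1 (t.getD pr.1 0 + d pr.1 pr.2)).getD pr.2 0 + d pr.1 pr.2)).getD q 0
        = t.getD q 0 + ((if pr.1 = q then d pr.1 pr.2 else 0)
                        + (if pr.2 = q then d pr.1 pr.2 else 0)) := by
      intro q
      by_cases h1 : q = pr.1
      · subst h1
        rw [pv_getD_set_ne _ _ _ _ _ (by omega), pv_getD_set_self _ _ _ _ hi]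
        rw [if_pos rfl, if_neg (Ne.symm hij)]
        ring
      · by_cases h2 : q = pr.2
        · subst h2
          rw [pv_getD_set_self _ _ _ _ (by simpa using hj),
              pv_getD_set_ne _ _ _ _ _ (by omega)]
          rw [if_neg hij, if_pos rfl]
          ring
        · have hn1 : pr.1 ≠ q := fun h => h1 h.symm
          have hn2 : pr.2 ≠ q := fun h => h2 h.symm
          rw [pv_getD_set_ne _ _ _ _ _ (by omega), pv_getD_set_ne _ _ _ _ _ (by omega)]
          rw [if_neg hn1, if_neg hn2]
          ring
    rw [ih _ (by
        intro q hq
        have := hmem q (List.mem_cons_of_mem _ hq)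
        simpa using this) p]
    rw [hstep p]
    ring

theorem pv_sum_indicator (v : Nat → Int) (p : Nat) :
    ∀ (len a : Nat),
    ((List.range' a len).map (fun j => if j = p then v j else 0)).sum
    = if a ≤ p ∧ p < a + len then v p else 0 := by
  intro len
  induction len with
  | zero =>
    intro a
    rw [List.range'_zero]
    simp only [List.map_nil, List.sum_nil]
    rw [if_neg (by intro hcon; omega)]
  | succ len ih =>
    intro a
    rw [List.range'_succ, List.map_cons, List.sum_cons, ih (a+1)]
    by_cases h : a = p
    · subst h
      rw [if_pos rfl, if_neg (by intro hcon; omega),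
          if_pos (by exact ⟨Nat.le_refl _, by omega⟩)]
      ring
    · rw [if_neg h]
      by_cases h2 : a+1 ≤ p ∧ p < (a+1)+len
      · rw [if_pos h2, if_pos (by exact ⟨by omega, by omega⟩)]
        ring
      · have h3 : ¬(a ≤ p ∧ p < a + (len+1)) := by
          intro hcon
          exact h2 ⟨by omega, by omega⟩
        rw [if_neg h2, if_neg h3]
        ring

theorem pv_sum_flatMap {α : Type} (g : α → List Int) :
    ∀ (l : List α), (l.flatMap g).sum = (l.map (fun a => (g a).sum)).sum := by
  intro l
  induction l with
  | nil => rfl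
  | cons a t ih => rw [List.flatMap_cons, List.sum_append, List.map_cons, List.sum_cons, ih]

theorem pv_sum_zero {α : Type} (l : List α) :
    (l.map (fun _ => (0:Int))).sum = 0 := by simp

-- totals.getD p 0 = Σ_{j<k} e p j, for the symmetric e with zero diagonal
theorem pv_totals_char (k : Nat) (e : Nat → Nat → Int)
    (hsym : ∀ i j, e i j = e j i) (hself : ∀ i, e i i = 0)
    (p : Nat) (hp : p < k) :
    ((List.range k).foldl (fun t i =>
        (List.range' (i+1) (k-(i+1))).foldl (fun t j =>
          let t1 := t.set i (t.getD i 0 + e i j)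
          t1.set j (t1.getD j 0 + e i j)) t) (List.replicate k (0:Int))).getD p 0
    = ((List.range k).map (fun j => e p j)).sum := by
  -- linearize the nested loops into a fold over the list of index pairs
  have hlin : ((List.range k).foldl (fun t i =>
        (List.range' (i+1) (k-(i+1))).foldl (fun t j =>
          let t1 := t.set i (t.getD i 0 + e i j)
          t1.set j (t1.getD j 0 + e i j)) t) (List.replicate k (0:Int)))
      = (((List.range k).flatMap (fun i => (List.range' (i+1) (k-(i+1))).map (fun j => (i, j)))).foldl
          (fun t pr =>
            let t1 := t.set pr.1 (t.getD pr.1 0 + e pr.1 pr.2)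
            t1.set pr.2 (t1.getD pr.2 0 + e pr.1 pr.2)) (List.replicate k (0:Int))) := by
    rw [pv_foldl_flatMap]
    apply pv_foldl_ext
    intro t i
    rw [List.foldl_map]
  rw [hlin]
  rw [pv_acc e _ _ (by
      intro pr hpr
      simp only [List.mem_flatMap, List.mem_map] at hpr
      obtain ⟨i, hik, j, hj, hpr⟩ := hpr
      have hik' := List.mem_range.mp hik
      have hj' := List.mem_range'.mp hj
      obtain ⟨s, hs1, hs2⟩ := hj'
      subst hpr
      simp only [List.length_replicate]
      omega) p]
  rw [List.getD_eq_getElem _ _ (by simpa using hp)]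
  simp only [List.getElem_replicate]
  rw [List.map_flatMap, pv_sum_flatMap]
  -- evaluate each inner row's contribution
  have hrow : ∀ i ∈ List.range k,
      (((List.range' (i+1) (k-(i+1))).map (fun j => (i, j))).map
        (fun pr => (if pr.1 = p then e pr.1 pr.2 else 0) + (if pr.2 = p then e pr.1 pr.2 else 0))).sum
      = if i = p then ((List.range' (p+1) (k-(p+1))).map (fun j => e p j)).sum
        else if i < p then e i p else 0 := by
    intro i hik
    have hik' := List.mem_range.mp hik
    rw [List.map_map]
    by_cases hip : i = p
    · subst hip
      rw [if_pos rfl]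
      apply congrArg
      apply List.map_congr_left
      intro j hj
      obtain ⟨s, hs1, hs2⟩ := List.mem_range'.mp hj
      have hji : j ≠ i := by omega
      simp [hji]
    · rw [if_neg hip]
      have : ((List.range' (i+1) (k-(i+1))).map
          ((fun pr => (if pr.1 = p then e pr.1 pr.2 else 0) + (if pr.2 = p then e pr.1 pr.2 else 0))
            ∘ (fun j => (i, j))))
          = (List.range' (i+1) (k-(i+1))).map (fun j => if j = p then e i j else 0) := by
        apply List.map_congr_left
        intro j hj
        simp only [Function.comp]
        rw [if_neg hip]
        ring_nf
      rw [this, pv_sum_indicator]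
      have hbound : (i+1) + (k-(i+1)) = k := by omega
      rw [hbound]
      split_ifs <;> omega
  rw [List.map_congr_left hrow]
  -- split range k at p on both sides
  have hsplit : List.range k = List.range' 0 p ++ p :: List.range' (p+1) (k-(p+1)) := by
    rw [List.range_eq_range']
    have h1 : List.range' 0 k = List.range' 0 p ++ List.range' p (k-p) := by
      have h0 := @List.range'_append_1 0 p (k-p)
      simp only [Nat.zero_add] at h0
      rw [h0]
      congr 1
      omega
    rw [h1]
    congr 1
    have : k - p = (k - (p+1)) + 1 := by omega
    rw [this, List.range'_succ]
  have hleft : ((List.range' 0 p).map (fun i =>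
      if i = p then ((List.range' (p+1) (k-(p+1))).map (fun j => e p j)).sum
      else if i < p then e i p else 0)).sum
      = ((List.range' 0 p).map (fun j => e p j)).sum := by
    apply congrArg
    apply List.map_congr_left
    intro i hi
    obtain ⟨s, hs1, hs2⟩ := List.mem_range'.mp hi
    rw [if_neg (by omega), if_pos (by omega)]
    exact hsym i p
  have hright : ((List.range' (p+1) (k-(p+1))).map (fun i =>
      if i = p then ((List.range' (p+1) (k-(p+1))).map (fun j => e p j)).sum
      else if i < p then e i p else 0)).sum = 0 := by
    have hz : ((List.range' (p+1) (k-(p+1))).map (fun i =>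
        if i = p then ((List.range' (p+1) (k-(p+1))).map (fun j => e p j)).sum
        else if i < p then e i p else 0))
        = (List.range' (p+1) (k-(p+1))).map (fun _ => (0:Int)) := by
      apply List.map_congr_left
      intro i hi
      obtain ⟨s, hs1, hs2⟩ := List.mem_range'.mp hi
      rw [if_neg (by omega), if_neg (by omega)]
    rw [hz, pv_sum_zero]
  rw [hsplit]
  simp only [List.map_append, List.sum_append, List.map_cons, List.sum_cons]
  rw [hleft, hright, hself p]
  simp

-- ---- index argmin simulates A's value argmin ----
theorem pv_idxval (seqs : List String) (g : List Int) (f : String → Int)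
    (hg : ∀ p, p < seqs.length → g.getD p 0 = f (seqs.getD p "")) :
    ∀ (l : List String) (m b : Nat), seqs.drop m = l → b < seqs.length →
    seqs.getD ((List.range' m l.length).foldl
        (fun best i => if g.getD i 0 < g.getD best 0 then i else best) b) ""
    = l.foldl (fun bv c => if f c < f bv then c else bv) (seqs.getD b "") := by
  intro l
  induction l with
  | nil => intro m b _ _; simp
  | cons c l' ih =>
    intro m b hdrop hb
    have hm : m < seqs.length := by
      have := congrArg List.length hdrop
      simp at this
      omega
    have hc : seqs[m]? = some c := by
      have h0 : (seqs.drop m)[0]? = some c := by rw [hdrop]; rfl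
      simpa using h0
    have hcget : seqs.getD m "" = c := by simp [List.getD, hc]
    have hdrop' : seqs.drop (m+1) = l' := by
      have := congrArg List.tail hdrop
      simpa [List.tail_drop] using this
    rw [List.length_cons, List.range'_succ, List.foldl_cons, List.foldl_cons]
    rw [hg m hm, hg b hb, hcget]
    by_cases h : f c < f (seqs.getD b "")
    · rw [if_pos h, if_pos h, ← hcget]
      exact ih (m+1) m hdrop' hm
    · rw [if_neg h, if_neg h]
      exact ih (m+1) b hdrop' hb

-- ---- cluster-level assembly ----
theorem pv_afold (f : String → Int) :
    ∀ (t : List String) (b : String),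
    t.foldl (fun (st : Option String × Option Int) c =>
        match st.2 with
        | none => (some c, some (f c))
        | some bd => if f c < bd then (some c, some (f c)) else st)
      (some b, some (f b))
    = (some (t.foldl (fun b c => if f c < f b then c else b) b),
       some (f (t.foldl (fun b c => if f c < f b then c else b) b))) := by
  intro t
  induction t with
  | nil => intro b; rfl
  | cons c t ih =>
    intro b
    rw [List.foldl_cons, List.foldl_cons]
    by_cases h : f c < f b
    · simp only [if_pos h]
      exact ih c
    · simp only [if_neg h]
      exact ih b

theorem pv_map_range_getD {α β : Type} (l : List α) (d : α) (h : α → β) :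
    (List.range l.length).map (fun j => h (l.getD j d)) = l.map h := by
  induction l with
  | nil => rfl
  | cons a tl ih =>
    rw [List.length_cons, List.range_succ_eq_map, List.map_cons, List.map_map, List.map_cons]
    congr 1

theorem pv_totals_port (seqs : List String) (p : Nat) (hp : p < seqs.length) :
    ((List.range seqs.length).foldl (fun t i =>
        (List.range' (i+1) (seqs.length-(i+1))).foldl (fun t j =>
          let d := pvEditDistanceAlt (seqs.getD i "") (seqs.getD j "")
          let t1 := t.set i (t.getD i 0 + d)
          t1.set j (t1.getD j 0 + d)) t) (List.replicate seqs.length (0:Int))).getD p 0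
    = (seqs.map (fun s => pvEditDistanceAlt (seqs.getD p "") s)).sum := by
  have h := pv_totals_char seqs.length
      (fun i j => pvEditDistanceAlt (seqs.getD i "") (seqs.getD j ""))
      (fun i j => pv_alt_symm _ _) (fun i => pv_alt_self _) p hp
  have hmap : ((List.range seqs.length).map
        (fun j => pvEditDistanceAlt (seqs.getD p "") (seqs.getD j ""))).sum
      = (seqs.map (fun s => pvEditDistanceAlt (seqs.getD p "") s)).sum :=
    congrArg List.sum (pv_map_range_getD seqs "" (fun s => pvEditDistanceAlt (seqs.getD p "") s))
  exact h.trans hmap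

theorem pv_cluster2 (x : String) (t : List String) :
    ((x :: t).foldl (fun (st : Option String × Option Int) candidate =>
        match st.2 with
        | none => (some candidate, some (((x :: t).map (fun s => pvEditDistanceAlt candidate s)).sum))
        | some bd => if ((x :: t).map (fun s => pvEditDistanceAlt candidate s)).sum < bd
            then (some candidate, some (((x :: t).map (fun s => pvEditDistanceAlt candidate s)).sum)) else st)
      ((none, none) : Option String × Option Int)).1.getD ""
    = (x :: t).getD ((List.range' 1 ((x :: t).length - 1)).foldl
        (fun best i =>
          if ((List.range (x :: t).length).foldl (fun tt i =>
                (List.range' (i+1) ((x :: t).length-(i+1))).foldl (fun tt j =>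
                  let d := pvEditDistanceAlt ((x :: t).getD i "") ((x :: t).getD j "")
                  let t1 := tt.set i (tt.getD i 0 + d)
                  t1.set j (t1.getD j 0 + d)) tt) (List.replicate (x :: t).length (0:Int))).getD i 0
            < ((List.range (x :: t).length).foldl (fun tt i =>
                (List.range' (i+1) ((x :: t).length-(i+1))).foldl (fun tt j =>
                  let d := pvEditDistanceAlt ((x :: t).getD i "") ((x :: t).getD j "")
                  let t1 := tt.set i (tt.getD i 0 + d)
                  t1.set j (t1.getD j 0 + d)) tt) (List.replicate (x :: t).length (0:Int))).getD best 0
            then i else best) 0) "" := by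
  rw [List.foldl_cons]
  show (t.foldl _ ((some x, some (((x :: t).map (fun s => pvEditDistanceAlt x s)).sum))
      : Option String × Option Int)).1.getD "" = _
  rw [pv_afold (fun c => ((x :: t).map (fun s => pvEditDistanceAlt c s)).sum) t x]
  simp only [Option.getD_some]
  have hg : ∀ p, p < (x :: t).length →
      ((List.range (x :: t).length).foldl (fun tt i =>
          (List.range' (i+1) ((x :: t).length-(i+1))).foldl (fun tt j =>
            let d := pvEditDistanceAlt ((x :: t).getD i "") ((x :: t).getD j "")
            let t1 := tt.set i (tt.getD i 0 + d)
            t1.set j (t1.getD j 0 + d)) tt) (List.replicate (x :: t).length (0:Int))).getD p 0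
      = (fun c => ((x :: t).map (fun s => pvEditDistanceAlt c s)).sum) ((x :: t).getD p "") :=
    fun p hp => pv_totals_port (x :: t) p hp
  have hiv := pv_idxval (x :: t) _
      (fun c => ((x :: t).map (fun s => pvEditDistanceAlt c s)).sum) hg t 1 0 rfl (by simp)
  exact hiv.symm

theorem pv_update_eq (clusters : List (Int × List String)) :
    update_medoids clusters = update_medoids_alt clusters := by
  unfold update_medoids update_medoids_alt
  apply pv_foldl_ext
  intro acc kv
  simp only []
  cases hk : kv.2 with
  | nil => rfl
  | cons x t =>
    rw [if_neg (by simp), if_neg (by simp)]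
    have hf : ∀ (st : Option String × Option Int) (c : String),
        (fun (st : Option String × Option Int) (candidate : String) =>
          match st.2 with
          | none => (some candidate, some (((x :: t).map (fun s => pvEditDistance candidate s)).sum))
          | some bd => if ((x :: t).map (fun s => pvEditDistance candidate s)).sum < bd
              then (some candidate, some (((x :: t).map (fun s => pvEditDistance candidate s)).sum)) else st) st c
        = (fun (st : Option String × Option Int) (candidate : String) =>
          match st.2 with
          | none => (some candidate, some (((x :: t).map (fun s => pvEditDistanceAlt candidate s)).sum))
          | some bd => if ((x :: t).map (fun s => pvEditDistanceAlt candidate s)).sum < bd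
              then (some candidate, some (((x :: t).map (fun s => pvEditDistanceAlt candidate s)).sum)) else st) st c := by
      intro st c
      have he : ((x :: t).map (fun s => pvEditDistance c s)).sum
          = ((x :: t).map (fun s => pvEditDistanceAlt c s)).sum := by
        congr 1
        exact List.map_congr_left (fun s _ => pv_edit_eq c s)
      simp only [he]
    rw [pv_foldl_ext _ _ hf]
    exact congrArg (fun y => acc ++ [y]) (pv_cluster2 x t)

-- ===== VERDICT (by name: the statement is the Claim_ definition above) =====
theorem update_medoids_spec : Claim_equal_update_medoids := by
  intro clusters _
  unfold Spec_update_medoids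
  exact pv_update_eq clusters
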